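-- pv_equiv track=rewrite | github.com/5-algorithms/minji | week8/1.py | solution
-- ===== SOURCE A (Python) =====
-- def solution(id_list, report, k):
--     answer = []
--     over_k = []
--     warning = {}
--
--     for item in id_list:
--         warning[item] = [0, set([])]
--
--     for item in report:
--         a, b = item.split()
--         if b in warning[a][1]:
--             continue
--         else:
--             warning[a][1].add(b)
--             warning[b][0] += 1
--             if warning[b][0] >= k:
--                 over_k.append(b)
--     over_k = set(over_k)
--
--     for i, e in warning.items():
--         answer.append(len(e[1] & over_k))
--
--     return answer
-- ===== SOURCE B (Python) =====
-- def solution(id_list, report, k):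
--     pairs = {tuple(item.split()) for item in report}
--     count = {i: 0 for i in id_list}
--     for a, b in pairs:
--         count[b] += 1
--     banned = {b for b in count if count[b] >= k}
--     result = {i: 0 for i in id_list}
--     for a, b in pairs:
--         if b in banned:
--             result[a] += 1
--     return list(result.values())
-- ===== Notes on version B (the rewrite author's own statement) =====
-- stated objective: alternative
-- what changed: Replaces the single sequential pass that mutates per-reporter sets and a running over-k list with a comprehension pipeline: dedup the reports into a set of (reporter, reported) pairs once, tally reports per user from that set, derive the banned set, then re-scan the deduped pairs to credit each reporter, returning the dict's values.
import Mathlib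
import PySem

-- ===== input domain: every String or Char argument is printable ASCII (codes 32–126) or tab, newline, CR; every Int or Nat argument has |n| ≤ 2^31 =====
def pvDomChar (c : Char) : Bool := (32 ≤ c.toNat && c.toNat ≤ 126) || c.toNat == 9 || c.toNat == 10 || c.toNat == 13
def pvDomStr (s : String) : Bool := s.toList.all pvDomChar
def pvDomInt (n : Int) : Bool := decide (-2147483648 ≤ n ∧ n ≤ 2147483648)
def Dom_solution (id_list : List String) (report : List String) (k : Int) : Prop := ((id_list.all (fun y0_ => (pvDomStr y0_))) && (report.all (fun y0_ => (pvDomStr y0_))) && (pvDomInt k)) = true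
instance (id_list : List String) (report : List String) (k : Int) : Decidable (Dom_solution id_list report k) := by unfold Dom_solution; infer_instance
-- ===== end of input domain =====

-- B replaces A's single stateful pass (per-reporter sets + running over-k list) with a
-- comprehension pipeline: dedup the reports once, tally per-user counts, derive the banned
-- set, then re-scan the deduped pairs to credit reporters (alternative decomposition, same cost).
-- ===== PORT A =====
-- Port of A; A mutates only its own local dict, no caller-visible side effects.
def solution (id_list : List String) (report : List String) (k : Int) : List Int :=
  let warning : PySem.Dict String (Int × PySem.Set String) :=
    id_list.foldl (fun w item => w.insert item (0, PySem.Set.empty)) (PySem.Dict.mk [])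
  let st := report.foldl
    (fun (st : PySem.Dict String (Int × PySem.Set String) × List String) item =>
      match PySem.Str.split₀ item with
      | [a, b] =>
        match st.1.get? a with
        | some ea =>
          if ea.2.contains b then st
          else
            let w := st.1.insert a (ea.1, ea.2.add b)
            match w.get? b with
            | some eb =>
              let w := w.insert b (eb.1 + 1, eb.2)
              if k ≤ eb.1 + 1 then (w, st.2 ++ [b]) else (w, st.2)
            | none => (w, st.2)       -- Python: KeyError (outside Pre_)
        | none => st                  -- Python: KeyError (outside Pre_)
      | _ => st)                      -- Python: ValueError on unpacking (outside Pre_)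
    (warning, [])
  let over_k : PySem.Set String := PySem.Set.ofList st.2
  st.1.items.map (fun ie => PySem.Set.len (PySem.Set.inter ie.2.2 over_k))

-- ===== PORT B =====
def solution_alt (id_list : List String) (report : List String) (k : Int) : List Int :=
  let pairs : PySem.Set (List String) := PySem.Set.ofList (report.map PySem.Str.split₀)
  let count : PySem.Dict String Int :=
    id_list.foldl (fun d i => d.insert i 0) (PySem.Dict.mk [])
  let count := pairs.foldl
    (fun d p =>
      if p.length = 2 then            -- 'a, b = p' (≠ 2 words: ValueError, outside Pre_)
        let b := (p.drop 1).headD ""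
        match d.get? b with
        | none => d                   -- Python: KeyError (outside Pre_)
        | some c => d.insert b (c + 1)
      else d)
    count
  let banned : PySem.Set String :=
    PySem.Set.ofList ((count.items.filter (fun kv => decide (k ≤ kv.2))).map (fun kv => kv.1))
  let result : PySem.Dict String Int :=
    id_list.foldl (fun d i => d.insert i 0) (PySem.Dict.mk [])
  let result := pairs.foldl
    (fun d p =>
      if p.length = 2 then            -- 'a, b = p' (≠ 2 words: ValueError, outside Pre_)
        let a := p.headD ""
        let b := (p.drop 1).headD ""
        if banned.contains b then
          match d.get? a with
          | none => d                 -- Python: KeyError (outside Pre_)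
          | some c => d.insert a (c + 1)
        else d
      else d)
    result
  result.values

-- ===== PRECONDITION & SPEC =====
-- Pre_ excludes exactly the inputs where Python A raises: a report entry that does not
-- split into two words (ValueError) or that mentions a user absent from id_list (KeyError).
def Pre_solution (id_list : List String) (report : List String) (k : Int) : Prop :=
  ∀ item ∈ report, (PySem.Str.split₀ item).length = 2 ∧
    ∀ x ∈ PySem.Str.split₀ item, x ∈ id_list

instance (id_list : List String) (report : List String) (k : Int) :
    Decidable (Pre_solution id_list report k) := by unfold Pre_solution; infer_instance

def pvWitness_solution : List String × List String × Int :=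
  (["muzi", "frodo", "apeach"], ["muzi frodo", "apeach frodo", "frodo muzi"], 2)

def Spec_solution (id_list : List String) (report : List String) (k : Int) (out : List Int) : Prop := out = solution_alt id_list report k
instance (id_list : List String) (report : List String) (k : Int) (out : List Int) : Decidable (Spec_solution id_list report k out) := by unfold Spec_solution; infer_instance

-- ===== CLAIM (what is proved, stated in full; the proofs are below) =====
def Claim_equal_solution : Prop := ∀ (id_list : List String) (report : List String) (k : Int), Dom_solution id_list report k → Pre_solution id_list report k → Spec_solution id_list report k (solution id_list report k)

-- ===== LEMMAS AND PROOFS =====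

-- first/second component of a two-element word list
def fst2 (p : List String) : String := p.headD ""
def snd2 (p : List String) : String := (p.drop 1).headD ""

-- a well-formed report entry over the id universe
def okp (ids : List String) (p : List String) : Prop :=
  p = [fst2 p, snd2 p] ∧ fst2 p ∈ ids ∧ snd2 p ∈ ids

-- number of (distinct) processed pairs reporting x / set of users x has reported
def cntL (l : List (List String)) (x : String) : Int :=
  ((l.filter (fun p => snd2 p == x)).length : Int)
def ssetL (l : List (List String)) (x : String) : PySem.Set String :=
  (l.filter (fun p => fst2 p == x)).map snd2

theorem pvGet_mapkeys {V : Type} (D : List String) (F : String → V) (a : String)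
    (ha : a ∈ D) :
    (PySem.Dict.mk (D.map (fun x => (x, F x)))).get? a = some (F a) := by
  induction D with
  | nil => simp at ha
  | cons y ys ih =>
    by_cases h : y = a
    · subst h; simp [PySem.Dict.get?, List.find?_cons]
    · have ha' : a ∈ ys := by
        rcases List.mem_cons.mp ha with h' | h'
        · exact absurd h'.symm h
        · exact h'
      have hb : (y == a) = false := by simp [h]
      have := ih ha'
      simp only [PySem.Dict.get?, List.map_cons, List.find?_cons, hb, cond_false] at this ⊢
      exact this

theorem pvContains_mapkeys {V : Type} (D : List String) (F : String → V) (a : String) :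
    (PySem.Dict.mk (D.map (fun x => (x, F x)))).contains a = decide (a ∈ D) := by
  induction D with
  | nil => simp [PySem.Dict.contains]
  | cons y ys ih =>
    simp [PySem.Dict.contains, List.any_cons] at *
    by_cases h : y = a
    · subst h; simp
    · have h2 : ¬a = y := fun hh => h hh.symm
      simp [h, h2, ih]

theorem pvInsert_mapkeys {V : Type} (D : List String) (F : String → V) (a : String)
    (ha : a ∈ D) (v : V) :
    (PySem.Dict.mk (D.map (fun x => (x, F x)))).insert a v
      = PySem.Dict.mk (D.map (fun x => (x, if x = a then v else F x))) := by
  have hc : (PySem.Dict.mk (D.map (fun x => (x, F x)))).contains a = true := by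
    simp [pvContains_mapkeys, ha]
  simp only [PySem.Dict.insert, hc, if_pos]
  congr 1
  simp only [List.map_map]
  apply List.map_congr_left
  intro x _
  by_cases h : x = a <;> simp [h, beq_iff_eq]

theorem pvInsertNew_mapkeys {V : Type} (D : List String) (F : String → V) (a : String)
    (ha : a ∉ D) (v : V) :
    (PySem.Dict.mk (D.map (fun x => (x, F x)))).insert a v
      = PySem.Dict.mk (D.map (fun x => (x, F x)) ++ [(a, v)]) := by
  have hc : (PySem.Dict.mk (D.map (fun x => (x, F x)))).contains a = false := by
    rw [pvContains_mapkeys]; simp [ha]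
  simp only [PySem.Dict.insert, hc, Bool.false_eq_true, if_false]

theorem pvInit_mapkeys {V : Type} (ids : List String) (v0 : V) :
    ∀ E : List String,
    ids.foldl (fun d i => d.insert i v0) (PySem.Dict.mk (E.map (fun x => (x, v0))))
      = PySem.Dict.mk ((PySem.Set.update E ids).map (fun x => (x, v0))) := by
  induction ids with
  | nil => intro E; simp [PySem.Set.update]
  | cons i is ih =>
    intro E
    simp only [List.foldl_cons, PySem.Set.update, List.foldl_cons]
    by_cases h : i ∈ E
    · rw [pvInsert_mapkeys E _ i h]
      have h1 : (E.map (fun x => (x, if x = i then v0 else v0))) = E.map (fun x => (x, v0)) := by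
        apply List.map_congr_left; intro x _; simp
      have h2 : PySem.Set.add E i = E := by
        simp [PySem.Set.add, PySem.Set.contains, List.contains_iff_mem, h]
      rw [h1, h2]
      simpa [PySem.Set.update] using ih E
    · rw [pvInsertNew_mapkeys E _ i h]
      have h2 : PySem.Set.add E i = E ++ [i] := by
        simp [PySem.Set.add, PySem.Set.contains, List.contains_iff_mem, h]
      rw [h2]
      have := ih (E ++ [i])
      simpa [PySem.Set.update] using this

theorem pvDedup_snoc {α : Type} [BEq α] [LawfulBEq α] (hs : List α) (p : α) :
    PySem.List.dedup (hs ++ [p])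
      = if p ∈ hs then PySem.List.dedup hs else PySem.List.dedup hs ++ [p] := by
  have h1 : PySem.List.dedup (hs ++ [p]) = PySem.Set.add (PySem.List.dedup hs) p := by
    show List.foldl PySem.Set.add PySem.Set.empty (hs ++ [p]) = _
    rw [List.foldl_append]
    rfl
  rw [h1, PySem.Set.add]
  by_cases h : p ∈ hs
  · have hc : PySem.Set.contains (PySem.List.dedup hs) p = true := by
      simpa [PySem.Set.contains] using (PySem.List.mem_dedup hs p).mpr h
    simp [hc, h]
  · have hc : PySem.Set.contains (PySem.List.dedup hs) p = false := by
      simpa [PySem.Set.contains] using (fun hx => h ((PySem.List.mem_dedup hs p).mp hx))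
    simp [hc, h]

theorem cntL_nonneg (l : List (List String)) (x : String) : 0 ≤ cntL l x := by
  simp [cntL]

theorem cntL_snoc (l : List (List String)) (p : List String) (x : String) :
    cntL (l ++ [p]) x = cntL l x + (if snd2 p = x then 1 else 0) := by
  simp [cntL, List.filter_append]
  by_cases h : snd2 p = x <;> simp [h]

theorem ssetL_snoc (l : List (List String)) (p : List String) (x : String) :
    ssetL (l ++ [p]) x = if fst2 p = x then ssetL l x ++ [snd2 p] else ssetL l x := by
  simp [ssetL, List.filter_append]
  by_cases h : fst2 p = x <;> simp [h]

theorem mem_ssetL (l : List (List String)) (hok : ∀ p ∈ l, okp ids p) (x b : String) :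
    b ∈ ssetL l x ↔ [x, b] ∈ l := by
  simp only [ssetL, List.mem_map, List.mem_filter]
  constructor
  · rintro ⟨q, ⟨hq, hfst⟩, hsnd⟩
    have hq2 := (hok q hq).1
    rw [beq_iff_eq] at hfst
    rw [hfst, hsnd] at hq2
    exact hq2 ▸ hq
  · intro h
    refine ⟨[x, b], ⟨h, ?_⟩, ?_⟩ <;> simp [fst2, snd2]

-- two-element lists are determined by fst2/snd2
theorem pvLen2_eq (p : List String) (h : p.length = 2) : p = [fst2 p, snd2 p] := by
  match p, h with
  | [a, b], _ => rfl

-- ----- A-side step function (the body of A's report loop, split already applied) -----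
def stepA (k : Int) (st : PySem.Dict String (Int × PySem.Set String) × List String)
    (p : List String) : PySem.Dict String (Int × PySem.Set String) × List String :=
  match p with
  | [a, b] =>
    match st.1.get? a with
    | some ea =>
      if ea.2.contains b then st
      else
        let w := st.1.insert a (ea.1, ea.2.add b)
        match w.get? b with
        | some eb =>
          let w := w.insert b (eb.1 + 1, eb.2)
          if k ≤ eb.1 + 1 then (w, st.2 ++ [b]) else (w, st.2)
        | none => (w, st.2)
    | none => st
  | _ => st

-- ----- B-side step functions -----
def stepBc (d : PySem.Dict String Int) (p : List String) : PySem.Dict String Int :=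
  if p.length = 2 then
    match d.get? (snd2 p) with
    | none => d
    | some c => d.insert (snd2 p) (c + 1)
  else d

def stepBr (bn : PySem.Set String) (d : PySem.Dict String Int) (p : List String) :
    PySem.Dict String Int :=
  if p.length = 2 then
    if bn.contains (snd2 p) then
      match d.get? (fst2 p) with
      | none => d
      | some c => d.insert (fst2 p) (c + 1)
    else d
  else d

def rcntL (bn : PySem.Set String) (l : List (List String)) (x : String) : Int :=
  ((l.filter (fun p => fst2 p == x && bn.contains (snd2 p))).length : Int)

theorem rcntL_snoc (bn : PySem.Set String) (l : List (List String)) (p : List String)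
    (x : String) :
    rcntL bn (l ++ [p]) x
      = rcntL bn l x + (if fst2 p = x ∧ snd2 p ∈ bn then 1 else 0) := by
  simp [rcntL, List.filter_append]
  by_cases h1 : fst2 p = x <;> by_cases h2 : snd2 p ∈ bn <;> simp [h1, h2]

-- ----- the A loop invariant -----
theorem foldA_inv (ids : List String) (k : Int) :
    ∀ (qs hs : List (List String)) (ov : List String),
    (∀ p ∈ hs ++ qs, okp ids p) →
    (∀ b, b ∈ ov ↔ (1 ≤ cntL (PySem.List.dedup hs) b ∧ k ≤ cntL (PySem.List.dedup hs) b)) →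
    ∃ ov',
      qs.foldl (stepA k)
        (PySem.Dict.mk ((PySem.List.dedup ids).map
          (fun x => (x, (cntL (PySem.List.dedup hs) x, ssetL (PySem.List.dedup hs) x)))), ov)
      = (PySem.Dict.mk ((PySem.List.dedup ids).map
          (fun x => (x, (cntL (PySem.List.dedup (hs ++ qs)) x,
                         ssetL (PySem.List.dedup (hs ++ qs)) x)))), ov')
      ∧ ∀ b, b ∈ ov' ↔ (1 ≤ cntL (PySem.List.dedup (hs ++ qs)) b ∧
                        k ≤ cntL (PySem.List.dedup (hs ++ qs)) b) := by
  intro qs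
  induction qs with
  | nil =>
    intro hs ov hok hov
    exact ⟨ov, by simp, by simpa using hov⟩
  | cons p ps ih =>
    intro hs ov hok hov
    have hp : okp ids p := hok p (by simp)
    have hpe : p = [fst2 p, snd2 p] := hp.1
    have haD : fst2 p ∈ PySem.List.dedup ids := (PySem.List.mem_dedup ids _).mpr hp.2.1
    have hbD : snd2 p ∈ PySem.List.dedup ids := (PySem.List.mem_dedup ids _).mpr hp.2.2
    have hokdedup : ∀ q ∈ PySem.List.dedup hs, okp ids q := fun q hq =>
      hok q (by simp [List.mem_append]; exact Or.inl ((PySem.List.mem_dedup hs q).mp hq))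
    have hassoc : (hs ++ [p]) ++ ps = hs ++ (p :: ps) := by simp
    rw [List.foldl_cons]
    by_cases hmem : p ∈ hs
    · -- duplicate pair: A skips, spec state unchanged
      have hsk : PySem.Set.contains (ssetL (PySem.List.dedup hs) (fst2 p)) (snd2 p) = true := by
        have hin : [fst2 p, snd2 p] ∈ PySem.List.dedup hs := by
          rw [← hpe]; exact (PySem.List.mem_dedup hs p).mpr hmem
        simpa [PySem.Set.contains] using
          (mem_ssetL (PySem.List.dedup hs) hokdedup (fst2 p) (snd2 p)).mpr hin
      have hstep :
          stepA k (PySem.Dict.mk ((PySem.List.dedup ids).map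
            (fun x => (x, (cntL (PySem.List.dedup hs) x, ssetL (PySem.List.dedup hs) x)))), ov) p
          = (PySem.Dict.mk ((PySem.List.dedup ids).map
            (fun x => (x, (cntL (PySem.List.dedup hs) x, ssetL (PySem.List.dedup hs) x)))), ov) := by
        conv_lhs => rw [hpe]
        simp only [stepA, pvGet_mapkeys _ _ _ haD, hsk, eq_self_iff_true, if_true]
      rw [hstep]
      have hd : PySem.List.dedup (hs ++ [p]) = PySem.List.dedup hs := by
        rw [pvDedup_snoc, if_pos hmem]
      have := ih (hs ++ [p]) ov
        (by intro q hq; apply hok; rw [← hassoc]; exact hq)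
        (by rw [hd]; exact hov)
      rw [hd, hassoc] at this
      exact this
    · -- new pair: both counters advance
      have hbn : snd2 p ∉ ssetL (PySem.List.dedup hs) (fst2 p) := by
        intro hc
        have : [fst2 p, snd2 p] ∈ PySem.List.dedup hs :=
          (mem_ssetL (PySem.List.dedup hs) hokdedup _ _).mp hc
        rw [← hpe] at this
        exact hmem ((PySem.List.mem_dedup hs p).mp this)
      have hnsk : PySem.Set.contains (ssetL (PySem.List.dedup hs) (fst2 p)) (snd2 p) = false := by
        simpa [PySem.Set.contains] using hbn
      have hd : PySem.List.dedup (hs ++ [p]) = PySem.List.dedup hs ++ [p] := by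
        rw [pvDedup_snoc, if_neg hmem]
      have hstep :
          stepA k (PySem.Dict.mk ((PySem.List.dedup ids).map
            (fun x => (x, (cntL (PySem.List.dedup hs) x, ssetL (PySem.List.dedup hs) x)))), ov) p
          = (PySem.Dict.mk ((PySem.List.dedup ids).map
              (fun x => (x, (cntL (PySem.List.dedup (hs ++ [p])) x,
                             ssetL (PySem.List.dedup (hs ++ [p])) x)))),
             if k ≤ cntL (PySem.List.dedup hs) (snd2 p) + 1 then ov ++ [snd2 p] else ov) := by
        conv_lhs => rw [hpe]
        simp only [stepA]
        rw [pvGet_mapkeys _ _ _ haD]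
        simp only [hnsk, Bool.false_eq_true, if_false]
        have hadd : PySem.Set.add (ssetL (PySem.List.dedup hs) (fst2 p)) (snd2 p)
            = ssetL (PySem.List.dedup hs) (fst2 p) ++ [snd2 p] := by
          simp only [PySem.Set.add, hnsk, Bool.false_eq_true, if_false]
        rw [hadd]
        simp only [pvInsert_mapkeys _ _ _ haD, pvGet_mapkeys _ _ _ hbD,
          pvInsert_mapkeys _ _ _ hbD]
        -- now identify values and the dict function
        have hFb1 : (if snd2 p = fst2 p then
              (cntL (PySem.List.dedup hs) (fst2 p), ssetL (PySem.List.dedup hs) (fst2 p) ++ [snd2 p])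
            else (cntL (PySem.List.dedup hs) (snd2 p), ssetL (PySem.List.dedup hs) (snd2 p))).1
            = cntL (PySem.List.dedup hs) (snd2 p) := by
          by_cases h : snd2 p = fst2 p <;> simp [h]
        rw [hd, hFb1]
        by_cases hkk : k ≤ cntL (PySem.List.dedup hs) (snd2 p) + 1 <;>
          [rw [if_pos hkk, if_pos hkk]; rw [if_neg hkk, if_neg hkk]] <;>
        · congr 2
          apply List.map_congr_left
          intro x _
          by_cases hxb : x = snd2 p <;> by_cases hxa : x = fst2 p
          · have hab : snd2 p = fst2 p := by rw [← hxb, hxa]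
            simp [hxb, hxa, ← hab, cntL_snoc, ssetL_snoc]
          · have hab : ¬snd2 p = fst2 p := fun h => hxa (hxb.trans h)
            have hab' : ¬fst2 p = snd2 p := fun h => hab h.symm
            simp [hxb, hab, hab', cntL_snoc, ssetL_snoc]
          · have hab : ¬snd2 p = fst2 p := fun h => hxb (hxa.trans h.symm)
            have hab' : ¬fst2 p = snd2 p := fun h => hab h.symm
            simp [hxb, hxa, hab, hab', cntL_snoc, ssetL_snoc]
          · have h1 : ¬snd2 p = x := fun h => hxb h.symm
            have h2 : ¬fst2 p = x := fun h => hxa h.symm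
            simp [hxb, hxa, h1, h2, cntL_snoc, ssetL_snoc]
      rw [hstep]
      have hov' : ∀ b, (b ∈ (if k ≤ cntL (PySem.List.dedup hs) (snd2 p) + 1
              then ov ++ [snd2 p] else ov)) ↔
          (1 ≤ cntL (PySem.List.dedup (hs ++ [p])) b ∧
           k ≤ cntL (PySem.List.dedup (hs ++ [p])) b) := by
        intro c
        have h0 := cntL_nonneg (PySem.List.dedup hs) c
        have h0' := cntL_nonneg (PySem.List.dedup hs) (snd2 p)
        have hcs : cntL (PySem.List.dedup (hs ++ [p])) c
            = cntL (PySem.List.dedup hs) c + (if snd2 p = c then 1 else 0) := by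
          rw [hd, cntL_snoc]
        have hcov := hov c
        by_cases hc : snd2 p = c
        · subst hc
          rw [hcs, if_pos rfl]
          by_cases hkk : k ≤ cntL (PySem.List.dedup hs) (snd2 p) + 1
          · rw [if_pos hkk]
            constructor
            · intro _; exact ⟨by omega, hkk⟩
            · intro _; exact List.mem_append_right _ (by simp)
          · rw [if_neg hkk, hcov]
            omega
        · rw [hcs, if_neg hc]
          have hmv : (c ∈ (if k ≤ cntL (PySem.List.dedup hs) (snd2 p) + 1
              then ov ++ [snd2 p] else ov)) ↔ c ∈ ov := by
            by_cases hkk : k ≤ cntL (PySem.List.dedup hs) (snd2 p) + 1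
            · rw [if_pos hkk]
              simp [List.mem_append, show ¬c = snd2 p from fun h => hc h.symm]
            · rw [if_neg hkk]
          rw [hmv, hcov]
          omega
      have := ih (hs ++ [p]) _
        (by intro q hq; apply hok; rw [← hassoc]; exact hq)
        hov'
      rw [hassoc] at this
      exact this

-- ----- the B count-loop invariant -----
theorem foldBc_inv (ids : List String) :
    ∀ (qs pre : List (List String)),
    (∀ p ∈ qs, okp ids p) →
    qs.foldl stepBc
      (PySem.Dict.mk ((PySem.List.dedup ids).map (fun x => (x, cntL pre x))))
    = PySem.Dict.mk ((PySem.List.dedup ids).map (fun x => (x, cntL (pre ++ qs) x))) := by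
  intro qs
  induction qs with
  | nil => intro pre _; simp
  | cons p ps ih =>
    intro pre hok
    have hp : okp ids p := hok p (by simp)
    have hpe : p = [fst2 p, snd2 p] := hp.1
    have hbD : snd2 p ∈ PySem.List.dedup ids := (PySem.List.mem_dedup ids _).mpr hp.2.2
    rw [List.foldl_cons]
    have hlen : p.length = 2 := by rw [hpe]; rfl
    have hstep : stepBc (PySem.Dict.mk ((PySem.List.dedup ids).map (fun x => (x, cntL pre x)))) p
        = PySem.Dict.mk ((PySem.List.dedup ids).map (fun x => (x, cntL (pre ++ [p]) x))) := by
      simp only [stepBc, hlen, eq_self_iff_true, if_true,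
        pvGet_mapkeys _ _ _ hbD, pvInsert_mapkeys _ _ _ hbD]
      congr 1
      apply List.map_congr_left
      intro x _
      by_cases hxb : x = snd2 p
      · simp [hxb, cntL_snoc]
      · have h1 : ¬snd2 p = x := fun h => hxb h.symm
        simp [hxb, h1, cntL_snoc]
    rw [hstep]
    have := ih (pre ++ [p]) (fun q hq => hok q (by simp [hq]))
    rw [List.append_assoc] at this
    simpa using this

-- ----- the B credit-loop invariant -----
theorem foldBr_inv (ids : List String) (bn : PySem.Set String) :
    ∀ (qs pre : List (List String)),
    (∀ p ∈ qs, okp ids p) →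
    qs.foldl (stepBr bn)
      (PySem.Dict.mk ((PySem.List.dedup ids).map (fun x => (x, rcntL bn pre x))))
    = PySem.Dict.mk ((PySem.List.dedup ids).map (fun x => (x, rcntL bn (pre ++ qs) x))) := by
  intro qs
  induction qs with
  | nil => intro pre _; simp
  | cons p ps ih =>
    intro pre hok
    have hp : okp ids p := hok p (by simp)
    have hpe : p = [fst2 p, snd2 p] := hp.1
    have haD : fst2 p ∈ PySem.List.dedup ids := (PySem.List.mem_dedup ids _).mpr hp.2.1
    rw [List.foldl_cons]
    have hlen : p.length = 2 := by rw [hpe]; rfl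
    have hstep : stepBr bn (PySem.Dict.mk ((PySem.List.dedup ids).map (fun x => (x, rcntL bn pre x)))) p
        = PySem.Dict.mk ((PySem.List.dedup ids).map (fun x => (x, rcntL bn (pre ++ [p]) x))) := by
      by_cases hbnb : bn.contains (snd2 p) = true
      · have hbm : snd2 p ∈ bn := by simpa [PySem.Set.contains] using hbnb
        simp only [stepBr, hlen, eq_self_iff_true, if_true, hbnb,
          pvGet_mapkeys _ _ _ haD, pvInsert_mapkeys _ _ _ haD]
        congr 1
        apply List.map_congr_left
        intro x _
        by_cases hxa : x = fst2 p
        · simp [hxa, rcntL_snoc, hbm]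
        · have h1 : ¬(fst2 p = x ∧ snd2 p ∈ bn) := fun h => hxa h.1.symm
          simp [hxa, rcntL_snoc, h1]
      · have hbm : snd2 p ∉ bn := by
          intro hc
          rw [show bn.contains (snd2 p) = true from by simpa [PySem.Set.contains] using hc] at hbnb
          exact hbnb rfl
        have hbnb' : bn.contains (snd2 p) = false := by simpa [PySem.Set.contains] using hbm
        simp only [stepBr, hlen, eq_self_iff_true, if_true, hbnb', Bool.false_eq_true, if_false]
        congr 1
        apply List.map_congr_left
        intro x _
        have h1 : ¬(fst2 p = x ∧ snd2 p ∈ bn) := fun h => hbm h.2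
        simp [rcntL_snoc, h1]
    rw [hstep]
    have := ih (pre ++ [p]) (fun q hq => hok q (by simp [hq]))
    rw [List.append_assoc] at this
    simpa using this

-- ----- the initial dict built from id_list -----
theorem pvInitDict {V : Type} (ids : List String) (v0 : V) :
    ids.foldl (fun d i => d.insert i v0) (PySem.Dict.mk [])
      = PySem.Dict.mk ((PySem.List.dedup ids).map (fun x => (x, v0))) := by
  have h0 : (PySem.Dict.mk ([] : List (String × V)))
      = PySem.Dict.mk (([] : List String).map (fun x => (x, v0))) := rfl
  rw [h0, pvInit_mapkeys ids v0 [], PySem.Set.update_nil_left]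
  rfl

-- ----- unfolding the ports to the named step functions -----
theorem solution_unfold (ids rep : List String) (k : Int) :
    solution ids rep k =
      (let st := (rep.map PySem.Str.split₀).foldl (stepA k)
        (ids.foldl (fun w item => w.insert item ((0 : Int), (PySem.Set.empty : PySem.Set String)))
          (PySem.Dict.mk []), []);
       st.1.items.map (fun ie => PySem.Set.len (PySem.Set.inter ie.2.2 (PySem.Set.ofList st.2)))) := by
  rw [List.foldl_map]
  rfl

theorem solution_alt_unfold (ids rep : List String) (k : Int) :
    solution_alt ids rep k =
      (let pairs := PySem.Set.ofList (rep.map PySem.Str.split₀)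
       let count := pairs.foldl stepBc
         (ids.foldl (fun d i => d.insert i (0 : Int)) (PySem.Dict.mk []))
       let banned : PySem.Set String :=
         PySem.Set.ofList ((count.items.filter (fun kv => decide (k ≤ kv.2))).map (fun kv => kv.1))
       (pairs.foldl (stepBr banned)
         (ids.foldl (fun d i => d.insert i (0 : Int)) (PySem.Dict.mk []))).values) := rfl

-- pointwise equality of the two per-user answers
theorem pv_point (ids : List String) (k : Int) (H : List (List String)) (ov' bnl : List String)
    (hokP : ∀ p ∈ PySem.Set.ofList H, okp ids p)
    (hov' : ∀ b : String, b ∈ ov' ↔ (1 ≤ cntL (PySem.Set.ofList H) b ∧ k ≤ cntL (PySem.Set.ofList H) b))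
    (hbn : ∀ c : String, c ∈ bnl ↔ (c ∈ PySem.List.dedup ids ∧ k ≤ cntL (PySem.Set.ofList H) c))
    (i : String) :
    PySem.Set.len (PySem.Set.inter (ssetL (PySem.Set.ofList H) i) (PySem.Set.ofList ov'))
      = rcntL (PySem.Set.ofList bnl) (PySem.Set.ofList H) i := by
  simp only [PySem.Set.len, PySem.Set.inter, ssetL, rcntL]
  rw [List.filter_map, List.length_map, List.filter_filter]
  congr 1
  congr 1
  apply List.filter_congr
  intro p hpP
  have hop : okp ids p := hokP p hpP
  by_cases hfi : fst2 p = i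
  · have h1c : 1 ≤ cntL (PySem.Set.ofList H) (snd2 p) := by
      have hmemf : p ∈ (PySem.Set.ofList H).filter (fun q => snd2 q == snd2 p) :=
        List.mem_filter.mpr ⟨hpP, by simp⟩
      have hpos : 0 < ((PySem.Set.ofList H).filter (fun q => snd2 q == snd2 p)).length :=
        List.length_pos_of_mem hmemf
      simp only [cntL]
      omega
    have hcD : snd2 p ∈ PySem.List.dedup ids :=
      (PySem.List.mem_dedup ids _).mpr hop.2.2
    have hio : (snd2 p ∈ ov') ↔ (snd2 p ∈ bnl) := by
      by_cases hk : k ≤ cntL (PySem.Set.ofList H) (snd2 p)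
      · exact ⟨fun _ => (hbn _).mpr ⟨hcD, hk⟩, fun _ => (hov' _).mpr ⟨h1c, hk⟩⟩
      · exact ⟨fun hc => absurd ((hov' _).mp hc).2 hk, fun hc => absurd ((hbn _).mp hc).2 hk⟩
    have hfi' : (fst2 p == i) = true := by simpa using hfi
    rw [hfi']
    simp only [Function.comp_apply, Bool.and_true, Bool.true_and]
    by_cases hm : snd2 p ∈ ov'
    · rw [show (PySem.Set.ofList ov').contains (snd2 p) = true from
          by simpa [PySem.Set.contains] using (PySem.Set.mem_ofList ov' _).mpr hm,
        show (PySem.Set.ofList bnl).contains (snd2 p) = true from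
          by simpa [PySem.Set.contains] using (PySem.Set.mem_ofList bnl _).mpr (hio.mp hm)]
    · rw [show (PySem.Set.ofList ov').contains (snd2 p) = false from
          by simpa [PySem.Set.contains] using
            (fun hc => hm ((PySem.Set.mem_ofList ov' _).mp hc)),
        show (PySem.Set.ofList bnl).contains (snd2 p) = false from
          by simpa [PySem.Set.contains] using
            (fun hc => hm (hio.mpr ((PySem.Set.mem_ofList bnl _).mp hc)))]
  · have hfi' : (fst2 p == i) = false := by simpa using hfi
    rw [hfi']
    simp


theorem pv_main (ids rep : List String) (k : Int)
    (hpre : Pre_solution ids rep k) :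
    solution ids rep k = solution_alt ids rep k := by
  have hokH : ∀ p ∈ rep.map PySem.Str.split₀, okp ids p := by
    intro p hp
    obtain ⟨item, hitem, rfl⟩ := List.mem_map.mp hp
    obtain ⟨hlen, hmem⟩ := hpre item hitem
    have hpe := pvLen2_eq _ hlen
    refine ⟨hpe, hmem _ ?_, hmem _ ?_⟩
    · rw [hpe]; simp [fst2]
    · rw [hpe]; simp [snd2]
  have hokP : ∀ p ∈ PySem.Set.ofList (rep.map PySem.Str.split₀), okp ids p := by
    intro p hp
    exact hokH p ((PySem.Set.mem_ofList _ p).mp hp)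
  -- ===== A side =====
  obtain ⟨ov', heq, hov'⟩ := foldA_inv ids k (rep.map PySem.Str.split₀) [] []
    (by simpa using hokH)
    (by
      intro b
      constructor
      · intro h; exact absurd h (List.not_mem_nil)
      · rintro ⟨h1, h2⟩
        have hz : cntL (PySem.List.dedup []) b = 0 := rfl
        rw [hz] at h1
        omega)
  simp only [List.nil_append] at heq hov'
  have hA : solution ids rep k =
      (PySem.List.dedup ids).map (fun i =>
        PySem.Set.len (PySem.Set.inter (ssetL (PySem.List.dedup (rep.map PySem.Str.split₀)) i)
          (PySem.Set.ofList ov'))) := by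
    rw [solution_unfold]
    show ((rep.map PySem.Str.split₀).foldl (stepA k)
        (ids.foldl (fun w item => w.insert item ((0 : Int), (PySem.Set.empty : PySem.Set String)))
          (PySem.Dict.mk []), [])).1.items.map _ = _
    rw [pvInitDict ids ((0 : Int), (PySem.Set.empty : PySem.Set String))]
    rw [show (PySem.Dict.mk ((PySem.List.dedup ids).map
          (fun x => (x, ((0 : Int), (PySem.Set.empty : PySem.Set String))))))
        = PySem.Dict.mk ((PySem.List.dedup ids).map
          (fun x => (x, (cntL (PySem.List.dedup []) x, ssetL (PySem.List.dedup []) x)))) from rfl]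
    rw [heq]
    simp only [List.map_map]
    rfl
  -- ===== B side =====
  have hcount := foldBc_inv ids (PySem.Set.ofList (rep.map PySem.Str.split₀)) [] hokP
  simp only [List.nil_append] at hcount
  -- banned membership
  have hbn_mem : ∀ c : String,
      (c ∈ (((PySem.Dict.mk ((PySem.List.dedup ids).map
            (fun x => (x, cntL (PySem.Set.ofList (rep.map PySem.Str.split₀)) x)))).items.filter
              (fun kv => decide (k ≤ kv.2))).map (fun kv => kv.1)))
        ↔ (c ∈ PySem.List.dedup ids ∧
           k ≤ cntL (PySem.Set.ofList (rep.map PySem.Str.split₀)) c) := by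
    intro c
    constructor
    · intro hcm
      obtain ⟨kv, hkvf, rfl⟩ := List.mem_map.mp hcm
      have hkv := List.mem_filter.mp hkvf
      obtain ⟨x, hx, rfl⟩ := List.mem_map.mp hkv.1
      exact ⟨hx, by simpa using hkv.2⟩
    · rintro ⟨hc, hk⟩
      apply List.mem_map.mpr
      refine ⟨(c, cntL (PySem.Set.ofList (rep.map PySem.Str.split₀)) c), ?_, rfl⟩
      apply List.mem_filter.mpr
      exact ⟨List.mem_map.mpr ⟨c, hc, rfl⟩, by simpa using hk⟩
  have hresult := foldBr_inv ids
    (PySem.Set.ofList (((PySem.Dict.mk ((PySem.List.dedup ids).map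
        (fun x => (x, cntL (PySem.Set.ofList (rep.map PySem.Str.split₀)) x)))).items.filter
          (fun kv => decide (k ≤ kv.2))).map (fun kv => kv.1)))
    (PySem.Set.ofList (rep.map PySem.Str.split₀)) [] hokP
  simp only [List.nil_append] at hresult
  have hB : solution_alt ids rep k =
      (PySem.List.dedup ids).map (fun i =>
        rcntL (PySem.Set.ofList (((PySem.Dict.mk ((PySem.List.dedup ids).map
            (fun x => (x, cntL (PySem.Set.ofList (rep.map PySem.Str.split₀)) x)))).items.filter
              (fun kv => decide (k ≤ kv.2))).map (fun kv => kv.1)))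
          (PySem.Set.ofList (rep.map PySem.Str.split₀)) i) := by
    rw [solution_alt_unfold]
    show ((PySem.Set.ofList (rep.map PySem.Str.split₀)).foldl (stepBr _)
        (ids.foldl (fun d i => d.insert i (0 : Int)) (PySem.Dict.mk []))).values = _
    rw [pvInitDict ids (0 : Int)]
    rw [show (PySem.Dict.mk ((PySem.List.dedup ids).map (fun x => (x, (0 : Int)))))
        = PySem.Dict.mk ((PySem.List.dedup ids).map (fun x => (x, cntL [] x))) from rfl]
    rw [hcount]
    rw [show (PySem.Dict.mk ((PySem.List.dedup ids).map (fun x => (x, cntL [] x))))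
        = PySem.Dict.mk ((PySem.List.dedup ids).map (fun x => (x, rcntL
            (PySem.Set.ofList (((PySem.Dict.mk ((PySem.List.dedup ids).map
              (fun x => (x, cntL (PySem.Set.ofList (rep.map PySem.Str.split₀)) x)))).items.filter
                (fun kv => decide (k ≤ kv.2))).map (fun kv => kv.1))) [] x))) from rfl]
    rw [hresult]
    simp only [PySem.Dict.values, List.map_map]
    rfl
  -- ===== pointwise equality =====
  rw [hA, hB]
  apply List.map_congr_left
  intro i _
  rw [show PySem.List.dedup (rep.map PySem.Str.split₀)
      = PySem.Set.ofList (rep.map PySem.Str.split₀) from rfl]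
  exact pv_point ids k (rep.map PySem.Str.split₀) ov' _ hokP hov' hbn_mem i

-- ===== VERDICT (by name: the statement is the Claim_ definition above) =====
theorem solution_spec : Claim_equal_solution := by
  unfold Claim_equal_solution
  intro ids rep k _ hpre
  unfold Spec_solution
  exact pv_main ids rep k hpre
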